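-- pv_equiv track=rewrite | github.com/pypi-data/pypi-mirror-203 | packages/copernicus-marine-client/copernicus_marine_client-0.5.0.tar.gz/copernicus_marine_client-0.5.0/copernicus_marine_client/download_functions/download_ftp.py | parse_ftp_dataset_url
-- ===== SOURCE A (Python) =====
-- def parse_ftp_dataset_url(data_paths: list[str]) -> dict:
--     path_dict: dict[str, list[str]] = {}
--     for data_path in data_paths:
--         host = data_path[len("ftp://") :].split("/")[0]
--         path = data_path[len("ftp://" + host + "/") :]
--         if host in path_dict.keys():
--             path_dict[host].append(path)
--         else:
--             path_dict[host] = [path]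
--     return path_dict
-- ===== SOURCE B (Python) =====
-- def parse_ftp_dataset_url(data_paths: list[str]) -> dict:
--     # map-then-group: parse every url to a (host, path) pair first, then build the
--     # dict by first-occurrence host order with one filter pass per distinct host
--     pairs = []
--     for data_path in data_paths:
--         host = data_path[len("ftp://"):].split("/")[0]
--         pairs.append((host, data_path[len("ftp://" + host + "/"):]))
--     hosts = list(dict.fromkeys(h for h, _ in pairs))
--     return {h: [p for h2, p in pairs if h2 == h] for h in hosts}
-- ===== Notes on version B (the rewrite author's own statement) =====
-- stated objective: alternative
-- what changed: B replaces A's single-pass dict accumulation (membership test then append-or-insert per element) by a map-then-group decomposition: parse all urls to (host, path) pairs, dedup the hosts in first-occurrence order, and build each host's list with one filter pass.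
import Mathlib
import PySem

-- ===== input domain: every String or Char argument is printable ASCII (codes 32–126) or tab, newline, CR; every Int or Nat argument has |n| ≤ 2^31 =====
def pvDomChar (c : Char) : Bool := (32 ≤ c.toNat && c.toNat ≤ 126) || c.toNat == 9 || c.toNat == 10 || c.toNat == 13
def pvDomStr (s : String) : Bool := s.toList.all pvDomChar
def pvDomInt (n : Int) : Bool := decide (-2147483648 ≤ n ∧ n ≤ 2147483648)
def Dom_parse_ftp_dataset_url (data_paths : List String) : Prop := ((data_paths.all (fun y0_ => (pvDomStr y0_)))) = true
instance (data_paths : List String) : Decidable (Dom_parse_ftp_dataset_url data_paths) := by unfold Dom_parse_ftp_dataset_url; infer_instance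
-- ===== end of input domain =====

-- B replaces A's single-pass dict accumulation by a map-then-group decomposition
-- (parse all urls to pairs, dedup hosts in first-occurrence order, one filter pass per host); alternative, not faster.

-- ===== PORT A =====
-- split("/") with a non-empty separator never returns an empty list, so Python's [0] is headD "".
def parse_ftp_dataset_url (data_paths : List String) : List (String × List String) :=
  (data_paths.foldl (fun path_dict data_path =>
      let host := ((PySem.Str.split? (PySem.Str.slice data_path (some 6) none) "/").getD []).headD ""
      let path := PySem.Str.slice data_path (some (PySem.Str.len ("ftp://" ++ host ++ "/"))) none
      if path_dict.contains host then
        path_dict.insert host (path_dict.getD host [] ++ [path])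
      else
        path_dict.insert host [path])
    (PySem.Dict.empty : PySem.Dict String (List String))).items

-- ===== PORT B =====
-- B-side helper: one url → (host, path), the same slicing as the Python source
def pvParse (data_path : String) : String × String :=
  let host := ((PySem.Str.split? (PySem.Str.slice data_path (some 6) none) "/").getD []).headD ""
  (host, PySem.Str.slice data_path (some (PySem.Str.len ("ftp://" ++ host ++ "/"))) none)

def parse_ftp_dataset_url_alt (data_paths : List String) : List (String × List String) :=
  let pairs := data_paths.map pvParse
  let hosts := PySem.List.dedup (pairs.map Prod.fst)
  hosts.map (fun h => (h, (pairs.filter (fun q => q.1 == h)).map Prod.snd))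

-- ===== PRECONDITION & SPEC =====
def Spec_parse_ftp_dataset_url (data_paths : List String) (out : List (String × List String)) : Prop := out = parse_ftp_dataset_url_alt data_paths
instance (data_paths : List String) (out : List (String × List String)) : Decidable (Spec_parse_ftp_dataset_url data_paths out) := by unfold Spec_parse_ftp_dataset_url; infer_instance

-- ===== CLAIM (what is proved, stated in full; the proofs are below) =====
def Claim_equal_parse_ftp_dataset_url : Prop := ∀ (data_paths : List String), Dom_parse_ftp_dataset_url data_paths → Spec_parse_ftp_dataset_url data_paths (parse_ftp_dataset_url data_paths)

-- ===== LEMMAS AND PROOFS =====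

-- A's loop body is exactly "modify (append [p])" at key h
theorem pv_step_eq (d : PySem.Dict String (List String)) (h p : String) :
    (if d.contains h then d.insert h (d.getD h [] ++ [p]) else d.insert h [p])
    = d.modify h [] (· ++ [p]) := by
  unfold PySem.Dict.modify
  by_cases hc : d.contains h = true
  · rw [if_pos hc]
  · rw [if_neg hc, PySem.Dict.getD_of_not_contains _ _ (by simpa using hc)]
    rfl

theorem pv_fold_eq (L : List String) (d : PySem.Dict String (List String)) :
    L.foldl (fun path_dict data_path =>
      let host := ((PySem.Str.split? (PySem.Str.slice data_path (some 6) none) "/").getD []).headD ""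
      let path := PySem.Str.slice data_path (some (PySem.Str.len ("ftp://" ++ host ++ "/"))) none
      if path_dict.contains host then path_dict.insert host (path_dict.getD host [] ++ [path])
      else path_dict.insert host [path]) d
    = (L.map pvParse).foldl (fun d p => d.modify p.1 [] (· ++ [p.2])) d := by
  induction L generalizing d with
  | nil => rfl
  | cons x xs ih =>
    simp only [List.map_cons, List.foldl_cons]
    have hx : pvParse x = (((PySem.Str.split? (PySem.Str.slice x (some 6) none) "/").getD []).headD "",
      PySem.Str.slice x (some (PySem.Str.len ("ftp://" ++ (((PySem.Str.split? (PySem.Str.slice x (some 6) none) "/").getD []).headD "") ++ "/"))) none) := rfl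
    rw [← ih, pv_step_eq, hx]

-- ===== VERDICT (by name: the statement is the Claim_ definition above) =====
theorem parse_ftp_dataset_url_spec : Claim_equal_parse_ftp_dataset_url := by
  intro L _
  unfold Spec_parse_ftp_dataset_url parse_ftp_dataset_url parse_ftp_dataset_url_alt
  rw [pv_fold_eq]
  set pairs := L.map pvParse with hp
  have hnd : ((pairs.foldl (fun d p => d.modify p.1 [] (· ++ [p.2])) (PySem.Dict.empty : PySem.Dict String (List String)))).keys.Nodup := by
    apply PySem.Dict.nodup_keys_foldl_modify_key pairs Prod.fst [] (fun _ p => (· ++ [p.2]))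
    simp [PySem.Dict.keys_empty]
  have hkeys : ((pairs.foldl (fun d p => d.modify p.1 [] (· ++ [p.2])) (PySem.Dict.empty : PySem.Dict String (List String)))).keys = PySem.Set.ofList (pairs.map Prod.fst) := by
    rw [PySem.Dict.keys_foldl_modify_key pairs Prod.fst [] (fun _ p => (· ++ [p.2]))]
    rw [PySem.Dict.keys_empty]
    exact PySem.Set.update_empty _
  rw [PySem.Dict.items_eq_map_keys _ hnd [], hkeys]
  simp only [PySem.List.dedup_eq_ofList]
  apply List.map_congr_left
  intro k _
  rw [PySem.Dict.getD_foldl_modify_append]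
  simp [PySem.Dict.getD_empty]
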